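-- pv_equiv track=rewrite | github.com/thsSON/TIL | Algorithm/Day07/baekjoon_3986.py | solution
-- ===== SOURCE A (Python) =====
-- def solution(words):
--     result = 0
--
--     for word in words:
--         stack = []
--         for char in word:
--             if not stack or stack[-1] != char:
--                 stack.append(char)
--             else:
--                 stack.pop()
--         if not stack:
--             result += 1
--
--     return result
-- ===== SOURCE B (Python) =====
-- def solution(words):
--     def one_pass(w):
--         out = []
--         i = 0
--         n = len(w)
--         while i < n:
--             if i + 1 < n and w[i] == w[i + 1]:
--                 i += 2          # drop the adjacent equal pair
--             else:
--                 out.append(w[i])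
--                 i += 1
--         return ''.join(out)
--
--     def reduce(w):
--         # iterate whole-string pair removal to a fixpoint
--         p = one_pass(w)
--         while p != w:
--             w, p = p, one_pass(p)
--         return w
--
--     return sum(1 for word in words if reduce(word) == '')
-- ===== Notes on version B (the rewrite author's own statement) =====
-- stated objective: alternative
-- what changed: Replaces the single-pass last-in-first-out stack with a fixpoint loop that repeatedly rebuilds the whole string removing adjacent equal pairs until nothing changes, counting words that reduce to the empty string (correct because adjacent-pair cancellation is confluent).
import Mathlib
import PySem

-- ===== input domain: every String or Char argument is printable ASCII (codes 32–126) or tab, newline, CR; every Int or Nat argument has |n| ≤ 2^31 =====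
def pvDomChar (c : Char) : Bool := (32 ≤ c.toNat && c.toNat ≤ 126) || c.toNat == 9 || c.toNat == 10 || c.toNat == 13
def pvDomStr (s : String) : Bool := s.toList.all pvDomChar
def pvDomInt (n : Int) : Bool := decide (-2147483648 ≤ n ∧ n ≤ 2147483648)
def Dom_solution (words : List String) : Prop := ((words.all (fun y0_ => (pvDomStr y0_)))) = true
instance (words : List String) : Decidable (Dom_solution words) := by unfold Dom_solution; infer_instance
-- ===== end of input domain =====

-- B is an alternative exact algorithm (fixpoint of whole-string adjacent-pair removal
-- instead of A's single-pass stack); no speed claim.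

-- ===== PORT A =====
-- Python's stack is kept reversed: stack[-1] is the head, append = cons, pop = tail.
def runStack : List Char → List Char → List Char
  | stack, [] => stack
  | stack, c :: cs =>
    match stack with
    | [] => runStack [c] cs
    | t :: rest => if t ≠ c then runStack (c :: t :: rest) cs else runStack rest cs

def solution (words : List String) : Int :=
  words.foldl (fun result word =>
    if runStack [] word.toList = [] then result + 1 else result) 0

-- ===== PORT B =====
-- one left-to-right pass removing every adjacent equal pair it meets
def onePass : List Char → List Char
  | [] => []
  | [a] => [a]
  | a :: b :: rest => if a = b then onePass rest else a :: onePass (b :: rest)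

theorem onePass_length_le : ∀ (w : List Char), (onePass w).length ≤ w.length := by
  intro w
  induction w using onePass.induct with
  | case1 => simp [onePass]
  | case2 a => simp [onePass]
  | case3 b rest ih => simp [onePass]; omega
  | case4 a b rest he ih => simp [onePass, he]; simpa using ih

theorem onePass_ne_length {w : List Char} (h : onePass w ≠ w) :
    (onePass w).length < w.length := by
  induction w using onePass.induct with
  | case1 => simp [onePass] at h
  | case2 a => simp [onePass] at h
  | case3 b rest ih =>
    have := onePass_length_le rest
    simp [onePass]; omega
  | case4 a b rest he ih =>
    simp [onePass, he] at h ⊢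
    have := ih h
    simp only [List.length_cons] at this ⊢
    omega

-- iterate onePass to a fixpoint (Python B's while loop)
def reduceFix (w : List Char) : List Char :=
  let p := onePass w
  if h : p = w then w else reduceFix p
termination_by w.length
decreasing_by exact onePass_ne_length h

def solution_alt (words : List String) : Int :=
  (words.countP (fun word => reduceFix word.toList = []) : Int)

-- ===== PRECONDITION & SPEC =====
def Spec_solution (words : List String) (out : Int) : Prop := out = solution_alt words
instance (words : List String) (out : Int) : Decidable (Spec_solution words out) := by unfold Spec_solution; infer_instance

-- ===== CLAIM (what is proved, stated in full; the proofs are below) =====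
def Claim_equal_solution : Prop := ∀ (words : List String), Dom_solution words → Spec_solution words (solution words)

-- ===== LEMMAS AND PROOFS =====

-- "pair-free": no two adjacent equal characters
def PF (s : List Char) : Prop := List.IsChain (· ≠ ·) s

theorem pf_tail {t : Char} {r : List Char} (h : PF (t :: r)) : PF r := h.tail

theorem pf_cons {a t : Char} {r : List Char} (hne : t ≠ a) (h : PF (t :: r)) :
    PF (a :: t :: r) := List.isChain_cons_cons.mpr ⟨hne.symm, h⟩

-- one step of the stack machine
theorem run_nil (c : Char) (cs : List Char) :
    runStack [] (c :: cs) = runStack [c] cs := rfl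

theorem run_cons (t : Char) (r : List Char) (c : Char) (cs : List Char) :
    runStack (t :: r) (c :: cs) =
      if t ≠ c then runStack (c :: t :: r) cs else runStack r cs := rfl

-- consuming two equal characters leaves a pair-free stack unchanged
theorem run_cc {s : List Char} (hs : PF s) (a : Char) (rest : List Char) :
    runStack s (a :: a :: rest) = runStack s rest := by
  match s with
  | [] => simp [runStack]
  | t :: r =>
    by_cases ht : t = a
    · subst ht
      rw [run_cons, if_neg (by simp)]
      match r with
      | [] => simp [runStack]
      | u :: r' =>
        have hu : t ≠ u := (List.isChain_cons_cons.mp hs).1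
        rw [run_cons, if_pos (Ne.symm hu)]
    · rw [run_cons, if_pos ht, run_cons, if_neg (by simp)]

-- a whole pass changes nothing about the stack run
theorem run_onePass : ∀ (w s : List Char), PF s → runStack s (onePass w) = runStack s w := by
  intro w
  induction w using onePass.induct with
  | case1 => intro s _; simp [onePass]
  | case2 a => intro s _; simp [onePass]
  | case3 b rest ih =>
    intro s hs
    rw [show onePass (b :: b :: rest) = onePass rest by simp [onePass]]
    rw [ih s hs, run_cc hs]
  | case4 a b rest he ih =>
    intro s hs
    rw [show onePass (a :: b :: rest) = a :: onePass (b :: rest) by simp [onePass, he]]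
    match s with
    | [] =>
      rw [run_nil, run_nil]
      exact ih [a] (by simp [PF])
    | t :: r =>
      by_cases ht : t = a
      · subst ht
        rw [run_cons, if_neg (by simp), run_cons, if_neg (by simp)]
        exact ih r (pf_tail hs)
      · rw [run_cons, if_pos ht, run_cons, if_pos ht]
        exact ih (a :: t :: r) (pf_cons ht hs)

-- a fixpoint of onePass is pair-free
theorem onePass_fix_pf : ∀ (w : List Char), onePass w = w → PF w := by
  intro w
  induction w using onePass.induct with
  | case1 => intro _; simp [PF]
  | case2 a => intro _; simp [PF]
  | case3 b rest ih =>
    intro h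
    exfalso
    have h1 : onePass (b :: b :: rest) = onePass rest := by simp [onePass]
    have h2 := onePass_length_le rest
    have h3 : (onePass (b :: b :: rest)).length < (b :: b :: rest).length := by
      rw [h1]; simp; omega
    rw [h] at h3; omega
  | case4 a b rest he ih =>
    intro h
    rw [show onePass (a :: b :: rest) = a :: onePass (b :: rest) by simp [onePass, he]] at h
    have h2 : onePass (b :: rest) = b :: rest := (List.cons_inj_right a).mp h
    exact List.isChain_cons_cons.mpr ⟨he, ih h2⟩

-- running a pair-free word onto a compatible stack just pushes it
theorem run_pf (v : List Char) : ∀ (s : List Char), PF v →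
    (∀ a, v.head? = some a → s.head? ≠ some a) → runStack s v = v.reverse ++ s := by
  induction v with
  | nil => intro s _ _; simp [runStack]
  | cons c cs ih =>
    intro s hv hcomp
    have hstep : runStack s (c :: cs) = runStack (c :: s) cs := by
      match s with
      | [] => simp [runStack]
      | t :: r =>
        have : t ≠ c := fun h => hcomp c rfl (by simp [h])
        rw [run_cons]; simp [this]
    rw [hstep, ih (c :: s) (pf_tail hv)]
    · simp
    · intro a ha hca
      match cs, ha with
      | a :: cs', rfl =>
        have hne : c ≠ a := (List.isChain_cons_cons.mp hv).1
        simp at hca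
        exact hne hca

theorem reduceFix_fix : ∀ (w : List Char), onePass (reduceFix w) = reduceFix w := by
  intro w
  induction w using reduceFix.induct with
  | case1 w p h => rw [reduceFix, dif_pos h]; exact h
  | case2 w p h ih => rw [reduceFix, dif_neg h]; exact ih

theorem run_reduceFix : ∀ (w : List Char), runStack [] (reduceFix w) = runStack [] w := by
  intro w
  induction w using reduceFix.induct with
  | case1 w p h => rw [reduceFix, dif_pos h]
  | case2 w p h ih =>
    rw [reduceFix, dif_neg h]
    rw [ih, run_onePass w [] (by simp [PF])]

-- the two per-word tests agree
theorem key (w : List Char) : (runStack [] w = []) = (reduceFix w = []) := by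
  have h1 : runStack [] w = (reduceFix w).reverse := by
    rw [← run_reduceFix w]
    rw [run_pf (reduceFix w) [] (onePass_fix_pf _ (reduceFix_fix w)) (by simp)]
    simp
  rw [h1]
  simp

theorem main_fold : ∀ (ws : List String) (n : Int),
    ws.foldl (fun r w => if runStack [] w.toList = [] then r + 1 else r) n
      = n + (ws.countP (fun w => reduceFix w.toList = []) : Int) := by
  intro ws
  induction ws with
  | nil => intro n; simp
  | cons w ws ih =>
    intro n
    by_cases h : reduceFix w.toList = [] <;>
      simp [List.foldl_cons, key w.toList, h, ih]; ring

-- ===== VERDICT (by name: the statement is the Claim_ definition above) =====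
theorem solution_spec : Claim_equal_solution := by
  intro words _
  unfold Spec_solution solution solution_alt
  rw [main_fold words 0]
  simp
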